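-- pv_equiv track=rewrite | github.com/EngineeringSoftware/teco | python/teco/exe/constraints.py | accept_toks
-- ===== SOURCE A (Python) =====
-- from typing import Dict, List, Optional, Set, Tuple
--
-- def accept_toks(toks: List[str]) -> bool:
--     # first 2 tokens: class_name method_name
--     if len(toks) <= 2:
--         return False
--
--     i = 2
--     if toks[i] != "(":
--         return False
--
--     i += 1
--     while i < len(toks) and toks[i] != ")":
--         if toks[i] == "L":
--             if len(toks) < i + 3 or toks[i + 2] != ";" or toks[i + 1] == ")":
--                 return False
--             i += 3
--         else:
--             if toks[i] not in {"[", "B", "C", "D", "F", "I", "J", "S", "Z"}: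
--                 return False
--             i += 1
--
--     if i >= len(toks) or toks[i] != ")":
--         return False
--     i += 1
--
--     while i < len(toks) and toks[i] == "[":
--         i += 1
--
--     if i == len(toks):
--         return False
--     if toks[i] == "L":
--         return len(toks) == i + 3 and toks[i + 2] == ";"
--     else:
--         return toks[i] in {"B", "C", "D", "F", "I", "J", "S", "Z", "V"}
-- ===== SOURCE B (Python) =====
-- from typing import List, Optional
--
-- _BASES = {"[", "B", "C", "D", "F", "I", "J", "S", "Z"}
--
-- def _args(ts: List[str]) -> Optional[List[str]]:
--     # consume argument descriptors until ')'; return the remainder after ')'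
--     while True:
--         if not ts:
--             return None
--         h = ts[0]
--         if h == ")":
--             return ts[1:]
--         if h == "L":
--             if 3 <= len(ts) and ts[2] == ";" and ts[1] != ")":
--                 ts = ts[3:]
--             else:
--                 return None
--         elif h in _BASES:
--             ts = ts[1:]
--         else:
--             return None
--
-- def _ret(ts: List[str]) -> bool:
--     while ts and ts[0] == "[":
--         ts = ts[1:]
--     if not ts:
--         return False
--     if ts[0] == "L":
--         return len(ts) == 3 and ts[2] == ";"
--     return ts[0] in {"B", "C", "D", "F", "I", "J", "S", "Z", "V"}
--
-- def accept_toks(toks: List[str]) -> bool: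
--     if len(toks) <= 2 or toks[2] != "(":
--         return False
--     rest = _args(toks[3:])
--     return rest is not None and _ret(rest)
-- ===== Notes on version B (the rewrite author's own statement) =====
-- stated objective: alternative
-- what changed: Index-threading while-loops over one flat list are replaced by a recursive-descent decomposition on list suffixes: one structurally recursive consumer for the argument section returning the remainder after ')', and a separate recursive validator for the return descriptor.
import Mathlib
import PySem

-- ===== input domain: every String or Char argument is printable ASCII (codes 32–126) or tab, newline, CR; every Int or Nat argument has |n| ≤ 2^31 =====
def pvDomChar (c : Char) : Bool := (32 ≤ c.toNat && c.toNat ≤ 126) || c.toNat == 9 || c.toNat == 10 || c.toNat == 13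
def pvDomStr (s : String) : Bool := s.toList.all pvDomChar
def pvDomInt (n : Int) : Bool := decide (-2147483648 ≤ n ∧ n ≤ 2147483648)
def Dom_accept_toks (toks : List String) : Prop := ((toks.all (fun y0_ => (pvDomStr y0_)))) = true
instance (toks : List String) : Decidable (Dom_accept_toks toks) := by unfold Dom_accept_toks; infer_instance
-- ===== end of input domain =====

-- B replaces A's index-threading while-loops by a recursive-descent decomposition on list suffixes (objective: alternative, same cost).

-- ===== PORT A =====
-- A's while-loop over the argument section, threading the index i (literal transliteration).
def argLoopA (toks : List String) (i : Nat) : Option Nat :=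
  if _h : i < toks.length ∧ toks.getD i "" ≠ ")" then
    if toks.getD i "" = "L" then
      if toks.length < i + 3 ∨ toks.getD (i + 2) "" ≠ ";" ∨ toks.getD (i + 1) "" = ")" then none
      else argLoopA toks (i + 3)
    else if ["[", "B", "C", "D", "F", "I", "J", "S", "Z"].contains (toks.getD i "") then
      argLoopA toks (i + 1)
    else none
  else some i
termination_by toks.length - i
decreasing_by all_goals omega

-- A's second while-loop skipping leading "[" of the return descriptor.
def skipLoopA (toks : List String) (i : Nat) : Nat :=
  if _h : i < toks.length ∧ toks.getD i "" = "[" then skipLoopA toks (i + 1) else i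
termination_by toks.length - i
decreasing_by omega

def accept_toks (toks : List String) : Bool :=
  if toks.length ≤ 2 then false
  else if toks.getD 2 "" ≠ "(" then false
  else
    match argLoopA toks 3 with
    | none => false
    | some i =>
      if toks.length ≤ i ∨ toks.getD i "" ≠ ")" then false
      else
        let j := skipLoopA toks (i + 1)
        if j = toks.length then false
        else if toks.getD j "" = "L" then
          decide (toks.length = j + 3) && decide (toks.getD (j + 2) "" = ";")
        else ["B", "C", "D", "F", "I", "J", "S", "Z", "V"].contains (toks.getD j "")

-- ===== PORT B =====
-- B's recursive consumer of the argument section: returns the remainder after ")".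
def argsB : List String → Option (List String)
  | [] => none
  | h :: t =>
    if h = ")" then some t
    else if h = "L" then
      if 3 ≤ (h :: t).length ∧ (h :: t).getD 2 "" = ";" ∧ (h :: t).getD 1 "" ≠ ")" then
        argsB ((h :: t).drop 3)
      else none
    else if ["[", "B", "C", "D", "F", "I", "J", "S", "Z"].contains h then argsB t
    else none
termination_by ts => ts.length
decreasing_by all_goals (simp; try omega)

-- B's recursive validator of the return descriptor.
def retB : List String → Bool
  | [] => false
  | h :: t =>
    if h = "[" then retB t
    else if h = "L" then decide (t.length = 2) && decide (t.getD 1 "" = ";")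
    else ["B", "C", "D", "F", "I", "J", "S", "Z", "V"].contains h

def accept_toks_alt (toks : List String) : Bool :=
  if toks.length ≤ 2 ∨ toks.getD 2 "" ≠ "(" then false
  else
    match argsB (toks.drop 3) with
    | none => false
    | some rest => retB rest

-- ===== PRECONDITION & SPEC =====
def Spec_accept_toks (toks : List String) (out : Bool) : Prop := out = accept_toks_alt toks
instance (toks : List String) (out : Bool) : Decidable (Spec_accept_toks toks out) := by unfold Spec_accept_toks; infer_instance

-- ===== CLAIM (what is proved, stated in full; the proofs are below) =====
def Claim_equal_accept_toks : Prop := ∀ (toks : List String), Dom_accept_toks toks → Spec_accept_toks toks (accept_toks toks)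

-- ===== LEMMAS AND PROOFS =====

lemma getD_drop (toks : List String) (m k : Nat) :
    (toks.drop m).getD k "" = toks.getD (m + k) "" := by
  simp [List.getD_eq_getElem?_getD, List.getElem?_drop]

lemma drop_cons (toks : List String) (i : Nat) (h : i < toks.length) :
    toks.drop i = toks.getD i "" :: toks.drop (i + 1) := by
  rw [List.drop_eq_getElem_cons h, List.getD_eq_getElem _ _ h]

lemma ret_eq (toks : List String) (i : Nat) :
    (let j := skipLoopA toks i;
     if j = toks.length then false
     else if toks.getD j "" = "L" then
       decide (toks.length = j + 3) && decide (toks.getD (j + 2) "" = ";")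
     else ["B", "C", "D", "F", "I", "J", "S", "Z", "V"].contains (toks.getD j ""))
    = retB (toks.drop i) := by
  induction hn : toks.length - i using Nat.strong_induction_on generalizing i with
  | _ n IH =>
  by_cases hlt : i < toks.length
  · rw [drop_cons toks i hlt]
    by_cases hb : toks.getD i "" = "["
    · rw [skipLoopA]
      simp only [hlt, hb, and_self, dif_pos, retB, if_pos]
      exact IH (toks.length - (i + 1)) (by omega) (i + 1) rfl
    · rw [skipLoopA, dif_neg (fun h => hb h.2)]
      have hne : i ≠ toks.length := by omega
      rw [if_neg hne]
      by_cases hL : toks.getD i "" = "L"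
      · rw [if_pos hL]
        simp only [retB, hL, if_pos]
        congr 1
        · rw [List.length_drop]
          exact decide_eq_decide.mpr (by omega)
        · rw [getD_drop]
      · rw [if_neg hL]
        simp only [retB, hb, if_neg, not_false_eq_true, hL]
  · have hd : toks.drop i = [] := List.drop_eq_nil_of_le (by omega)
    rw [hd, skipLoopA, dif_neg (by intro h; omega)]
    by_cases he : i = toks.length
    · rw [if_pos he]; rfl
    · have hgd : toks.getD i "" = "" := List.getD_eq_default _ _ (by omega)
      rw [if_neg he, hgd]
      simp [retB]

lemma args_eq (toks : List String) (i : Nat) :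
    argsB (toks.drop i)
      = (match argLoopA toks i with
         | none => none
         | some j =>
           if toks.length ≤ j ∨ toks.getD j "" ≠ ")" then none
           else some (toks.drop (j + 1))) := by
  induction hn : toks.length - i using Nat.strong_induction_on generalizing i with
  | _ n IH =>
  by_cases hlt : i < toks.length
  · by_cases hrp : toks.getD i "" = ")"
    · rw [argLoopA, dif_neg (fun h => h.2 hrp)]
      have hred : (match some i with
         | none => none
         | some j =>
           if toks.length ≤ j ∨ toks.getD j "" ≠ ")" then none
           else some (toks.drop (j + 1)))
         = if toks.length ≤ i ∨ toks.getD i "" ≠ ")" then none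
           else some (toks.drop (i + 1)) := rfl
      rw [hred, if_neg (by push_neg; exact ⟨by omega, hrp⟩)]
      rw [drop_cons toks i hlt]
      simp only [argsB]
      rw [if_pos hrp]
    · rw [argLoopA, dif_pos ⟨hlt, hrp⟩, drop_cons toks i hlt]
      by_cases hL : toks.getD i "" = "L"
      · rw [if_pos hL]
        simp only [argsB]
        rw [if_neg hrp, if_pos hL]
        have e1 : (toks.getD i "" :: toks.drop (i + 1)).length = toks.length - i := by
          simp; omega
        have e2 : (toks.getD i "" :: toks.drop (i + 1)).getD 2 "" = toks.getD (i + 2) "" := by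
          show (toks.drop (i + 1)).getD 1 "" = _
          rw [getD_drop]
        have e3 : (toks.getD i "" :: toks.drop (i + 1)).getD 1 "" = toks.getD (i + 1) "" := by
          show (toks.drop (i + 1)).getD 0 "" = _
          rw [getD_drop]
        have e4 : (toks.getD i "" :: toks.drop (i + 1)).drop 3 = toks.drop (i + 3) := by
          show (toks.drop (i + 1)).drop 2 = _
          rw [List.drop_drop]
        rw [e1, e2, e3, e4]
        by_cases hc : 3 ≤ toks.length - i ∧ toks.getD (i + 2) "" = ";" ∧ toks.getD (i + 1) "" ≠ ")"
        · rw [if_pos hc, if_neg (by push_neg; exact ⟨by omega, hc.2.1, hc.2.2⟩)]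
          exact IH (toks.length - (i + 3)) (by omega) (i + 3) rfl
        · rw [if_neg hc,
            if_pos (by by_contra hno; push_neg at hno; exact hc ⟨by omega, hno.2.1, hno.2.2⟩)]
      · rw [if_neg hL]
        by_cases hm : ["[", "B", "C", "D", "F", "I", "J", "S", "Z"].contains (toks.getD i "")
        · rw [if_pos hm]
          simp only [argsB]
          rw [if_neg hrp, if_neg hL, if_pos hm]
          exact IH (toks.length - (i + 1)) (by omega) (i + 1) rfl
        · rw [if_neg hm]
          simp only [argsB]
          rw [if_neg hrp, if_neg hL, if_neg hm]
  · have hd : toks.drop i = [] := List.drop_eq_nil_of_le (by omega)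
    rw [hd, argLoopA, dif_neg (by intro h; omega)]
    have hred : (match some i with
       | none => none
       | some j =>
         if toks.length ≤ j ∨ toks.getD j "" ≠ ")" then none
         else some (toks.drop (j + 1)))
       = if toks.length ≤ i ∨ toks.getD i "" ≠ ")" then none
         else some (toks.drop (i + 1)) := rfl
    rw [hred, if_pos (Or.inl (by omega))]
    simp [argsB]

lemma final_branch (toks : List String) (j : Nat) :
    (if toks.length ≤ j ∨ toks.getD j "" ≠ ")" then false
     else
       let k := skipLoopA toks (j + 1);
       if k = toks.length then false
       else if toks.getD k "" = "L" then
         decide (toks.length = k + 3) && decide (toks.getD (k + 2) "" = ";")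
       else ["B", "C", "D", "F", "I", "J", "S", "Z", "V"].contains (toks.getD k ""))
    = (match (if toks.length ≤ j ∨ toks.getD j "" ≠ ")" then none
              else some (toks.drop (j + 1))) with
       | none => false
       | some rest => retB rest) := by
  by_cases hbad : toks.length ≤ j ∨ toks.getD j "" ≠ ")"
  · rw [if_pos hbad, if_pos hbad]
  · rw [if_neg hbad, if_neg hbad]
    exact ret_eq toks (j + 1)

-- ===== VERDICT (by name: the statement is the Claim_ definition above) =====
theorem accept_toks_spec : Claim_equal_accept_toks := by
  intro toks _dom
  unfold Spec_accept_toks accept_toks accept_toks_alt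
  by_cases h2 : toks.length ≤ 2
  · rw [if_pos h2, if_pos (Or.inl h2)]
  · by_cases hp : toks.getD 2 "" = "("
    · rw [if_neg h2, if_neg (not_not_intro hp),
        if_neg (show ¬(toks.length ≤ 2 ∨ toks.getD 2 "" ≠ "(") by push_neg; exact ⟨by omega, hp⟩),
        args_eq toks 3]
      generalize argLoopA toks 3 = o
      cases o with
      | none => rfl
      | some j => exact final_branch toks j
    · rw [if_neg h2, if_pos hp, if_pos (Or.inr hp)]
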